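-- pv_equiv track=rewrite | github.com/pouya1996/phage-therapy-prediction | src/preprocessing/feature_extractor.py | calculate_physical_chemical_features
-- ===== SOURCE A (Python) =====
-- from collections import Counter
--
-- def calculate_physical_chemical_features(sequence: str) -> list:
--     """
--     Calculate the total atomic composition of C, H, O, N, S for a protein sequence.
--
--     Args:
--         sequence: Protein sequence string
--
--     Returns:
--         List of 5 integer values representing total count of each element:
--         - Carbon (C)
--         - Hydrogen (H)
--         - Oxygen (O)
--         - Nitrogen (N)
--         - Sulfur (S)
--
--     Note:
--         Ambiguous residues (X, U, B, Z) are removed before counting.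
--         Each amino acid's elemental composition is based on its molecular formula.
--     """
--     # Remove any ambiguous residues before counting
--     clean_seq = sequence.replace('X', '').replace('U', '').replace('B', '').replace('Z', '')
--     elements = 'CHONS'
--     # Map each amino acid to its elemental composition
--     amino_acid_elements = {
--         'A': {'C': 3, 'H': 7, 'O': 2, 'N': 1, 'S': 0},
--         'C': {'C': 3, 'H': 7, 'O': 2, 'N': 1, 'S': 1},
--         'D': {'C': 4, 'H': 7, 'O': 4, 'N': 1, 'S': 0},
--         'E': {'C': 5, 'H': 9, 'O': 4, 'N': 1, 'S': 0},
--         'F': {'C': 9, 'H': 11, 'O': 2, 'N': 1, 'S': 0},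
--         'G': {'C': 2, 'H': 5, 'O': 2, 'N': 1, 'S': 0},
--         'H': {'C': 6, 'H': 9, 'O': 2, 'N': 3, 'S': 0},
--         'I': {'C': 6, 'H': 13, 'O': 2, 'N': 1, 'S': 0},
--         'K': {'C': 6, 'H': 14, 'O': 2, 'N': 2, 'S': 0},
--         'L': {'C': 6, 'H': 13, 'O': 2, 'N': 1, 'S': 0},
--         'M': {'C': 5, 'H': 11, 'O': 2, 'N': 1, 'S': 1},
--         'N': {'C': 4, 'H': 8, 'O': 3, 'N': 2, 'S': 0},
--         'P': {'C': 5, 'H': 9, 'O': 2, 'N': 1, 'S': 0},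
--         'Q': {'C': 5, 'H': 10, 'O': 3, 'N': 2, 'S': 0},
--         'R': {'C': 6, 'H': 14, 'O': 2, 'N': 4, 'S': 0},
--         'S': {'C': 3, 'H': 7, 'O': 3, 'N': 1, 'S': 0},
--         'T': {'C': 4, 'H': 9, 'O': 3, 'N': 1, 'S': 0},
--         'V': {'C': 5, 'H': 11, 'O': 2, 'N': 1, 'S': 0},
--         'W': {'C': 11, 'H': 12, 'O': 2, 'N': 2, 'S': 0},
--         'Y': {'C': 9, 'H': 11, 'O': 3, 'N': 1, 'S': 0}
--     }
--     aa_counts = Counter(clean_seq)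
--     # Sum per element across all amino acids in the sequence
--     return [
--         sum(amino_acid_elements.get(aa, {}).get(el, 0) * count for aa, count in aa_counts.items())
--         for el in elements
--     ]
-- ===== SOURCE B (Python) =====
-- _AA = {
--     'A': (3, 7, 2, 1, 0),  'C': (3, 7, 2, 1, 1),  'D': (4, 7, 4, 1, 0),
--     'E': (5, 9, 4, 1, 0),  'F': (9, 11, 2, 1, 0), 'G': (2, 5, 2, 1, 0),
--     'H': (6, 9, 2, 3, 0),  'I': (6, 13, 2, 1, 0), 'K': (6, 14, 2, 2, 0),
--     'L': (6, 13, 2, 1, 0), 'M': (5, 11, 2, 1, 1), 'N': (4, 8, 3, 2, 0),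
--     'P': (5, 9, 2, 1, 0),  'Q': (5, 10, 3, 2, 0), 'R': (6, 14, 2, 4, 0),
--     'S': (3, 7, 3, 1, 0),  'T': (4, 9, 3, 1, 0),  'V': (5, 11, 2, 1, 0),
--     'W': (11, 12, 2, 2, 0), 'Y': (9, 11, 3, 1, 0),
-- }
--
-- def calculate_physical_chemical_features(sequence: str) -> list:
--     """Stream once over the sequence, adding each residue's (C,H,O,N,S) tuple."""
--     c = h = o = n = s = 0
--     for ch in sequence:
--         t = _AA.get(ch)
--         if t is not None:
--             c += t[0]; h += t[1]; o += t[2]; n += t[3]; s += t[4]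
--     return [c, h, o, n, s]
-- ===== Notes on version B (the rewrite author's own statement) =====
-- stated objective: alternative
-- what changed: B drops A's remove-ambiguous-residues preprocessing and Counter group-then-weight structure: it streams once over the raw sequence, adding each residue's (C,H,O,N,S) 5-tuple from a composition table into five running totals (characters absent from the table, including X/U/B/Z, contribute nothing).
import Mathlib
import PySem

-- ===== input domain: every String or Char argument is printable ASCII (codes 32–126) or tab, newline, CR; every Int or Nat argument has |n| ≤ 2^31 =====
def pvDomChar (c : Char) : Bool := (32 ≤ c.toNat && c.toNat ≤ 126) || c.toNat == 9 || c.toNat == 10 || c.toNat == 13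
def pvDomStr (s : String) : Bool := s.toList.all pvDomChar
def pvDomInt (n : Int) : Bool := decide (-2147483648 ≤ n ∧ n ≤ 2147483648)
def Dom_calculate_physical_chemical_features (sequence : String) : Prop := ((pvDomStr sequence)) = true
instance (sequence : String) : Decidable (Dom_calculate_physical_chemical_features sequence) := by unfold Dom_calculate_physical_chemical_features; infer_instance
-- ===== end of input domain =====

-- B streams once over the raw sequence adding 5-tuples from a composition table, instead of A's
-- replace-then-Counter group-and-weight; same result, proved equal (objective: alternative decomposition).

-- ===== PORT A =====
-- A's amino_acid_elements dict, literally
def aaTable : PySem.Dict Char (PySem.Dict Char Int) := PySem.Dict.ofList [('A', PySem.Dict.ofList [('C',3),('H',7),('O',2),('N',1),('S',0)]),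
  ('C', PySem.Dict.ofList [('C',3),('H',7),('O',2),('N',1),('S',1)]),
  ('D', PySem.Dict.ofList [('C',4),('H',7),('O',4),('N',1),('S',0)]),
  ('E', PySem.Dict.ofList [('C',5),('H',9),('O',4),('N',1),('S',0)]),
  ('F', PySem.Dict.ofList [('C',9),('H',11),('O',2),('N',1),('S',0)]),
  ('G', PySem.Dict.ofList [('C',2),('H',5),('O',2),('N',1),('S',0)]),
  ('H', PySem.Dict.ofList [('C',6),('H',9),('O',2),('N',3),('S',0)]),
  ('I', PySem.Dict.ofList [('C',6),('H',13),('O',2),('N',1),('S',0)]),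
  ('K', PySem.Dict.ofList [('C',6),('H',14),('O',2),('N',2),('S',0)]),
  ('L', PySem.Dict.ofList [('C',6),('H',13),('O',2),('N',1),('S',0)]),
  ('M', PySem.Dict.ofList [('C',5),('H',11),('O',2),('N',1),('S',1)]),
  ('N', PySem.Dict.ofList [('C',4),('H',8),('O',3),('N',2),('S',0)]),
  ('P', PySem.Dict.ofList [('C',5),('H',9),('O',2),('N',1),('S',0)]),
  ('Q', PySem.Dict.ofList [('C',5),('H',10),('O',3),('N',2),('S',0)]),
  ('R', PySem.Dict.ofList [('C',6),('H',14),('O',2),('N',4),('S',0)]),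
  ('S', PySem.Dict.ofList [('C',3),('H',7),('O',3),('N',1),('S',0)]),
  ('T', PySem.Dict.ofList [('C',4),('H',9),('O',3),('N',1),('S',0)]),
  ('V', PySem.Dict.ofList [('C',5),('H',11),('O',2),('N',1),('S',0)]),
  ('W', PySem.Dict.ofList [('C',11),('H',12),('O',2),('N',2),('S',0)]),
  ('Y', PySem.Dict.ofList [('C',9),('H',11),('O',3),('N',1),('S',0)])]

def calculate_physical_chemical_features (sequence : String) : List Int :=
  let clean_seq := PySem.Str.replace (PySem.Str.replace (PySem.Str.replace (PySem.Str.replace sequence "X" "") "U" "") "B" "") "Z" ""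
  let elements := "CHONS"
  let aa_counts := PySem.Dict.counter clean_seq.toList
  elements.toList.map (fun el =>
    (aa_counts.items.map (fun p => (aaTable.getD p.1 PySem.Dict.empty).getD el 0 * p.2)).sum)

-- ===== PORT B =====
-- B's _AA dict of 5-tuples (C,H,O,N,S)
def altTable : PySem.Dict Char (Int × Int × Int × Int × Int) := PySem.Dict.ofList [('A', (3,7,2,1,0)),
  ('C', (3,7,2,1,1)),
  ('D', (4,7,4,1,0)),
  ('E', (5,9,4,1,0)),
  ('F', (9,11,2,1,0)),
  ('G', (2,5,2,1,0)),
  ('H', (6,9,2,3,0)),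
  ('I', (6,13,2,1,0)),
  ('K', (6,14,2,2,0)),
  ('L', (6,13,2,1,0)),
  ('M', (5,11,2,1,1)),
  ('N', (4,8,3,2,0)),
  ('P', (5,9,2,1,0)),
  ('Q', (5,10,3,2,0)),
  ('R', (6,14,2,4,0)),
  ('S', (3,7,3,1,0)),
  ('T', (4,9,3,1,0)),
  ('V', (5,11,2,1,0)),
  ('W', (11,12,2,2,0)),
  ('Y', (9,11,3,1,0))]

def calculate_physical_chemical_features_alt (sequence : String) : List Int :=
  let totals := sequence.toList.foldl (fun t ch =>
    match altTable.get? ch with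
    | some e => (t.1 + e.1, t.2.1 + e.2.1, t.2.2.1 + e.2.2.1, t.2.2.2.1 + e.2.2.2.1, t.2.2.2.2 + e.2.2.2.2)
    | none => t) ((0:Int), (0:Int), (0:Int), (0:Int), (0:Int))
  [totals.1, totals.2.1, totals.2.2.1, totals.2.2.2.1, totals.2.2.2.2]

-- ===== PRECONDITION & SPEC =====
def Spec_calculate_physical_chemical_features (sequence : String) (out : List Int) : Prop := out = calculate_physical_chemical_features_alt sequence
instance (sequence : String) (out : List Int) : Decidable (Spec_calculate_physical_chemical_features sequence out) := by unfold Spec_calculate_physical_chemical_features; infer_instance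

-- ===== CLAIM (what is proved, stated in full; the proofs are below) =====
def Claim_equal_calculate_physical_chemical_features : Prop := ∀ (sequence : String), Dom_calculate_physical_chemical_features sequence → Spec_calculate_physical_chemical_features sequence (calculate_physical_chemical_features sequence)

-- ===== LEMMAS AND PROOFS =====

-- the per-character contribution B adds for each of the five elements
def bComp (ch : Char) : Int × Int × Int × Int × Int := (altTable.get? ch).getD ((0:Int), 0, 0, 0, 0)

-- PySem.Chars.replace.go with a one-character pattern and empty replacement is a filter
theorem go_filter (x : Char) (l acc : List Char) (fuel : Nat) (h : l.length ≤ fuel) :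
    PySem.Chars.replace.go [x] [] fuel l acc = acc.reverse ++ l.filter (fun c => !(c == x)) := by
  induction l generalizing fuel acc with
  | nil => cases fuel <;> simp [PySem.Chars.replace.go]
  | cons c t ih =>
    cases fuel with
    | zero => simp at h
    | succ fuel =>
      simp only [PySem.Chars.replace.go]
      by_cases hc : c = x
      · subst hc
        simp [List.isPrefixOf, ih acc fuel (by simpa using h)]
      · have hp : [x].isPrefixOf (c :: t) = false := by
          simp [List.isPrefixOf]; exact fun hh => (hc hh.symm).elim
        simp only [hp, if_neg Bool.false_ne_true]
        rw [ih (c :: acc) fuel (by simpa using h)]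
        simp [hc]

-- replacing one character by the empty string is a filter
theorem replace_single (x : Char) (old : String) (hold : old.toList = [x]) (s : String) :
    (PySem.Str.replace s old "").toList = s.toList.filter (fun c => !(c == x)) := by
  simp [PySem.Str.replace, PySem.Chars.replace, hold]
  rw [go_filter x s.toList [] s.length (le_of_eq String.length_toList)]
  simp

-- summing f over a filtered list, where f vanishes off the filter, equals summing over the list
theorem sum_map_filter_eq (p : Char → Bool) (f : Char → Int) (l : List Char)
    (h : ∀ c, p c = false → f c = 0) :
    ((l.filter p).map f).sum = (l.map f).sum := by
  induction l with
  | nil => rfl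
  | cons c t ih =>
    by_cases hc : p c
    · simp [hc, ih]
    · simp only [Bool.not_eq_true] at hc
      simp [hc, ih, h c hc]

-- grouping by distinct characters and weighting by multiplicity equals a plain sum
theorem sum_dedup_count (xs : List Char) (f : Char → Int) :
    ((PySem.Set.ofList xs).map (fun k => f k * (xs.count k : Int))).sum = (xs.map f).sum := by
  have hnd : (PySem.Set.ofList xs).Nodup := PySem.Set.nodup_ofList xs
  rw [← List.sum_toFinset _ hnd]
  have hfs : (PySem.Set.ofList xs).toFinset = xs.toFinset := by
    ext c; simp [List.mem_toFinset, PySem.Set.mem_ofList]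
  rw [hfs]
  have := Finset.sum_list_map_count xs f
  rw [this]
  apply Finset.sum_congr rfl
  intro m _
  simp [mul_comm]

-- B's five-accumulator fold computes the five component sums
theorem foldl5 (l : List Char) (a1 a2 a3 a4 a5 : Int) :
    l.foldl (fun t ch =>
      match altTable.get? ch with
      | some e => (t.1 + e.1, t.2.1 + e.2.1, t.2.2.1 + e.2.2.1, t.2.2.2.1 + e.2.2.2.1, t.2.2.2.2 + e.2.2.2.2)
      | none => t) (a1, a2, a3, a4, a5)
    = (a1 + (l.map (fun c => (bComp c).1)).sum,
       a2 + (l.map (fun c => (bComp c).2.1)).sum,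
       a3 + (l.map (fun c => (bComp c).2.2.1)).sum,
       a4 + (l.map (fun c => (bComp c).2.2.2.1)).sum,
       a5 + (l.map (fun c => (bComp c).2.2.2.2)).sum) := by
  induction l generalizing a1 a2 a3 a4 a5 with
  | nil => simp
  | cons c t ih =>
    simp only [List.foldl_cons, List.map_cons, List.sum_cons]
    cases h : altTable.get? c with
    | none => rw [ih]; simp [bComp, h]
    | some e => rw [ih]; simp only [bComp, h, Option.getD_some]; refine Prod.ext ?_ (Prod.ext ?_ (Prod.ext ?_ (Prod.ext ?_ ?_))) <;> simp <;> ring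

set_option maxHeartbeats 2000000 in
theorem table_bridge (c : Char) :
    ((aaTable.getD c PySem.Dict.empty).getD 'C' 0,
     (aaTable.getD c PySem.Dict.empty).getD 'H' 0,
     (aaTable.getD c PySem.Dict.empty).getD 'O' 0,
     (aaTable.getD c PySem.Dict.empty).getD 'N' 0,
     (aaTable.getD c PySem.Dict.empty).getD 'S' 0) = bComp c := by
  by_cases h0 : 'A' = c
  · subst h0; decide
  by_cases h1 : 'C' = c
  · subst h1; decide
  by_cases h2 : 'D' = c
  · subst h2; decide
  by_cases h3 : 'E' = c
  · subst h3; decide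
  by_cases h4 : 'F' = c
  · subst h4; decide
  by_cases h5 : 'G' = c
  · subst h5; decide
  by_cases h6 : 'H' = c
  · subst h6; decide
  by_cases h7 : 'I' = c
  · subst h7; decide
  by_cases h8 : 'K' = c
  · subst h8; decide
  by_cases h9 : 'L' = c
  · subst h9; decide
  by_cases h10 : 'M' = c
  · subst h10; decide
  by_cases h11 : 'N' = c
  · subst h11; decide
  by_cases h12 : 'P' = c
  · subst h12; decide
  by_cases h13 : 'Q' = c
  · subst h13; decide
  by_cases h14 : 'R' = c
  · subst h14; decide
  by_cases h15 : 'S' = c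
  · subst h15; decide
  by_cases h16 : 'T' = c
  · subst h16; decide
  by_cases h17 : 'V' = c
  · subst h17; decide
  by_cases h18 : 'W' = c
  · subst h18; decide
  by_cases h19 : 'Y' = c
  · subst h19; decide
  simp [bComp, aaTable, altTable, PySem.Dict.ofList, PySem.Dict.update, PySem.Dict.insert, PySem.Dict.empty, PySem.Dict.getD, PySem.Dict.get?, PySem.Dict.contains, h0, h1, h2, h3, h4, h5, h6, h7, h8, h9, h10, h11, h12, h13, h14, h15, h16, h17, h18, h19]

-- getting an element count for a character outside the table contributes zero
theorem aa_zero (x : Char) (hx : aaTable.get? x = none) (el : Char) :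
    (aaTable.getD x PySem.Dict.empty).getD el 0 = 0 := by
  unfold PySem.Dict.getD
  rw [hx]
  simp [PySem.Dict.get?, PySem.Dict.empty]

-- A-side pipeline for one element column: counter over the filtered list, weighted by composition,
-- equals the plain per-character sum over the raw sequence
theorem colSum (s : String) (el : Char) :
    ((PySem.Dict.counter ((((s.toList.filter (fun c => !(c == 'X'))).filter (fun c => !(c == 'U'))).filter
        (fun c => !(c == 'B'))).filter (fun c => !(c == 'Z')))).items.map
      (fun p => (aaTable.getD p.1 PySem.Dict.empty).getD el 0 * p.2)).sum
    = (s.toList.map (fun c => (aaTable.getD c PySem.Dict.empty).getD el 0)).sum := by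
  rw [PySem.Dict.items_counter, List.map_map]
  simp only [Function.comp_def]
  rw [sum_dedup_count]
  rw [sum_map_filter_eq (fun c => !(c == 'Z')) _ _ (by
    intro c hc
    have : c = 'Z' := by simpa using hc
    subst this; exact aa_zero 'Z' (by decide) el)]
  rw [sum_map_filter_eq (fun c => !(c == 'B')) _ _ (by
    intro c hc
    have : c = 'B' := by simpa using hc
    subst this; exact aa_zero 'B' (by decide) el)]
  rw [sum_map_filter_eq (fun c => !(c == 'U')) _ _ (by
    intro c hc
    have : c = 'U' := by simpa using hc
    subst this; exact aa_zero 'U' (by decide) el)]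
  rw [sum_map_filter_eq (fun c => !(c == 'X')) _ _ (by
    intro c hc
    have : c = 'X' := by simpa using hc
    subst this; exact aa_zero 'X' (by decide) el)]

-- ===== VERDICT (by name: the statement is the Claim_ definition above) =====
theorem calculate_physical_chemical_features_spec : Claim_equal_calculate_physical_chemical_features := by
  intro sequence _
  unfold Spec_calculate_physical_chemical_features
  simp only [calculate_physical_chemical_features, calculate_physical_chemical_features_alt]
  rw [foldl5]
  have h1 := replace_single 'X' "X" rfl sequence
  have h2 := replace_single 'U' "U" rfl (PySem.Str.replace sequence "X" "")
  have h3 := replace_single 'B' "B" rfl (PySem.Str.replace (PySem.Str.replace sequence "X" "") "U" "")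
  have h4 := replace_single 'Z' "Z" rfl (PySem.Str.replace (PySem.Str.replace (PySem.Str.replace sequence "X" "") "U" "") "B" "")
  rw [h4, h3, h2, h1]
  rw [show ("CHONS" : String).toList = ['C','H','O','N','S'] from rfl]
  simp only [List.map_cons, List.map_nil]
  rw [colSum sequence 'C', colSum sequence 'H', colSum sequence 'O', colSum sequence 'N', colSum sequence 'S']
  rw [show (fun c => (aaTable.getD c PySem.Dict.empty).getD 'C' 0) = (fun c => (bComp c).1) from
        funext fun c => congrArg (fun t => t.1) (table_bridge c),
      show (fun c => (aaTable.getD c PySem.Dict.empty).getD 'H' 0) = (fun c => (bComp c).2.1) from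
        funext fun c => congrArg (fun t => t.2.1) (table_bridge c),
      show (fun c => (aaTable.getD c PySem.Dict.empty).getD 'O' 0) = (fun c => (bComp c).2.2.1) from
        funext fun c => congrArg (fun t => t.2.2.1) (table_bridge c),
      show (fun c => (aaTable.getD c PySem.Dict.empty).getD 'N' 0) = (fun c => (bComp c).2.2.2.1) from
        funext fun c => congrArg (fun t => t.2.2.2.1) (table_bridge c),
      show (fun c => (aaTable.getD c PySem.Dict.empty).getD 'S' 0) = (fun c => (bComp c).2.2.2.2) from
        funext fun c => congrArg (fun t => t.2.2.2.2) (table_bridge c)]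
  simp
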